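-- pv_equiv track=rewrite | github.com/flexigpt/vscode-extension | genreadme_from_docs.py | generate_github_toc
-- ===== SOURCE A (Python) =====
-- def sequentialize_header_priorities(header_priority_pairs):
--     for i in range(len(header_priority_pairs) - 1):
--         header, priority = header_priority_pairs[i]
--         next_header, next_priority = header_priority_pairs[i + 1]
--         if (next_priority - priority > 1):
--             header_priority_pairs[i + 1] = (next_header, priority + 1)
--     return header_priority_pairs
--
-- def create_github_header_anchor(header_title):
--     return '[{}](#{})'.format(header_title, header_title.strip().replace(' ', '-'))
--
-- def generate_github_toc(md_text, max_priority=3, toc_title='# Table of Contents'):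
--     lines_iter = iter(md_text.splitlines())
--     header_priority_pairs = []
--     in_code_block = False
--     for line in lines_iter:
--         if line.startswith('```'):
--             in_code_block = not in_code_block
--         elif not in_code_block and line.startswith('#') and ' ' in line:
--             md_header, header_title = line.split(' ', 1)
--             if md_header != md_header[0] * len(md_header) or len(md_header) > max_priority:
--                 continue
--             if header_title.lower() != 'table of contents' and len(header_title) > 1:
--                 header_priority_pairs.append((header_title, len(md_header)))
--
--     header_priority_pairs = sequentialize_header_priorities(header_priority_pairs)
--     if len(header_priority_pairs) == 0:
--         return None
--     bullet_list = [toc_title, '']  # Added a blank line after toc_title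
--     highest_priority = min(header_priority_pairs, key=lambda pair: pair[1])[1]
--     for header, priority in header_priority_pairs:
--         md_anchor = create_github_header_anchor(header)
--         bullet_list.append('\t' * (priority - highest_priority) + '* ' + md_anchor)
--
--     return '\n'.join(bullet_list)
-- ===== SOURCE B (Python) =====
-- def generate_github_toc(md_text, max_priority=3, toc_title='# Table of Contents'):
--     lines = md_text.splitlines()
--     # pass 1: a line sits inside a code block iff an odd number of ``` fence lines precede it
--     inside = []
--     c = 0
--     for l in lines:
--         inside.append(c % 2 == 1)
--         c += l.startswith('```')
--     # pass 2: collect (title, raw priority) of the accepted headers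
--     heads = []
--     for line, inc in zip(lines, inside):
--         if line.startswith('```') or inc or not line.startswith('#') or ' ' not in line:
--             continue
--         h, t = line.split(' ', 1)
--         if set(h) == {'#'} and len(h) <= max_priority and t.lower() != 'table of contents' and len(t) > 1:
--             heads.append((t, len(h)))
--     if not heads:
--         return None
--     # pass 3: closed form of the "no jump larger than 1" rule:
--     #   level_i = min_{j<=i}(p_j - j) + i  (a prefix minimum of the shifted priorities)
--     shifted = [p - i for i, (_, p) in enumerate(heads)]
--     mins = []
--     m = shifted[0]
--     for s in shifted:
--         m = min(m, s)
--         mins.append(m)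
--     levels = [mi + i for i, mi in enumerate(mins)]
--     base = min(levels)
--     rows = ['\t' * (lv - base) + '* [{}](#{})'.format(t, t.strip().replace(' ', '-'))
--             for (t, _), lv in zip(heads, levels)]
--     return '\n'.join([toc_title, ''] + rows)
-- ===== Notes on version B (the rewrite author's own statement) =====
-- stated objective: alternative
-- what changed: B replaces A's stateful toggle-and-collect loop plus mutating sequentialize pass by staged passes: a fence-count parity mask decides code-block membership, and the prev+1 clamp is computed by a closed form (level_i = prefix-min of (p_j - j) plus i) instead of the sequential clamp, then rendered by zipping titles with levels.
import Mathlib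
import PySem

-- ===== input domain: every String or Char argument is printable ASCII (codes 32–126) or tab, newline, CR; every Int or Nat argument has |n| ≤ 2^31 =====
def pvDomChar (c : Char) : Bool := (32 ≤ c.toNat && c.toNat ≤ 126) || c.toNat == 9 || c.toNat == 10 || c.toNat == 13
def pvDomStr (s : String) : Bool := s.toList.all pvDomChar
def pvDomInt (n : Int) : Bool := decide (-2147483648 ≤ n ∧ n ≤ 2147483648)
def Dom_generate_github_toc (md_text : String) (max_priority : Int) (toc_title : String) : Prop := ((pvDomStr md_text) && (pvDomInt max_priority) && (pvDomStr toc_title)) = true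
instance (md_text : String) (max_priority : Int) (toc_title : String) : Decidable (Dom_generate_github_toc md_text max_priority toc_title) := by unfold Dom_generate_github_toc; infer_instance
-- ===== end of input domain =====

-- B replaces A's stateful toggle-and-collect loop plus mutating sequentialize pass by staged
-- passes: a fence-count parity mask, a closed-form clamp (prefix minimum of p_j - j), and a
-- zip render; same return value.

-- ===== PORT A =====

-- sequentialize_header_priorities: the index loop mutating pair i+1 from (updated) pair i
def seqHP : List (String × Int) → List (String × Int)
  | [] => []
  | [p] => [p]
  | (h, p) :: (h2, p2) :: rest =>
      (h, p) :: seqHP ((h2, if p2 - p > 1 then p + 1 else p2) :: rest)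
  termination_by l => l.length
  decreasing_by simp

-- create_github_header_anchor
def anchorA (t : String) : String :=
  String.ofList ("[".toList ++ t.toList ++ "](#".toList
    ++ PySem.Chars.replace (PySem.Chars.strip t.toList) " ".toList "-".toList ++ ")".toList)

-- the body of A's for-loop over lines; state = (header_priority_pairs, in_code_block)
def parseA (max_priority : Int) (st : List (String × Int) × Bool) (line : String) :
    List (String × Int) × Bool :=
  let l := line.toList
  if PySem.Chars.startswith l "```".toList then (st.1, !st.2)
  else if !st.2 && PySem.Chars.startswith l "#".toList && PySem.Chars.isIn " ".toList l then
    -- line.split(' ', 1) with ' ' in line: part before the first space, part after (exact)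
    let md_header := l.takeWhile (· ≠ ' ')
    let header_title := (l.dropWhile (· ≠ ' ')).drop 1
    -- md_header[0]: md_header is nonempty here (line starts with '#'), headD is its head
    if md_header ≠ List.replicate md_header.length (md_header.headD ' ')
        ∨ (md_header.length : Int) > max_priority then st
    else if PySem.Chars.lower header_title ≠ "table of contents".toList
        ∧ header_title.length > 1 then
      (st.1 ++ [(String.ofList header_title, (md_header.length : Int))], st.2)
    else st
  else st

def generate_github_toc (md_text : String) (max_priority : Int) (toc_title : String) :
    Option String :=
  let st := (PySem.Str.splitlines md_text).foldl (parseA max_priority) ([], false)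
  let pairs := seqHP st.1
  if pairs.length = 0 then none
  else
    -- min(pairs, key=lambda pair: pair[1])[1]; pairs ≠ [] so min? is some (getD unreachable)
    let highest := ((PySem.List.min? pairs Prod.snd).getD ("", 0)).2
    -- '\t' * (priority - highest): Python gives '' for a non-positive count, as toNat does
    let bullets := pairs.foldl (fun acc hp =>
        acc ++ [String.ofList (List.replicate (hp.2 - highest).toNat '\t'
          ++ "* ".toList ++ (anchorA hp.1).toList)]) [toc_title, ""]
    some (PySem.Str.join "\n" bullets)

-- ===== PORT B =====

-- pass 1 of Source B: the inside[] mask — a line is in a code block iff an odd number of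
-- ``` fence lines precede it (c counts fences, parity checked before the increment)
def insideB (lines : List String) : List Bool :=
  (lines.foldl (fun (st : List Bool × Int) l =>
      (st.1 ++ [PySem.Int.mod st.2 2 == 1],
       st.2 + (if PySem.Chars.startswith l.toList "```".toList then 1 else 0))) ([], 0)).1

-- pass 2 of Source B: the body of the header-collecting loop over zip(lines, inside)
def headStepB (mp : Int) (acc : List (String × Int)) (li : String × Bool) :
    List (String × Int) :=
  let l := li.1.toList
  if PySem.Chars.startswith l "```".toList || li.2
      || !PySem.Chars.startswith l "#".toList || !PySem.Chars.isIn " ".toList l then acc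
  else
    -- line.split(' ', 1) with ' ' in line (exact)
    let h := l.takeWhile (· ≠ ' ')
    let t := (l.dropWhile (· ≠ ' ')).drop 1
    -- set(h) == {'#'} is PySem.Set.equal on PySem.Set.ofList
    if PySem.Set.equal (PySem.Set.ofList h) (PySem.Set.ofList ['#'])
        && decide ((h.length : Int) ≤ mp)
        && !decide (PySem.Chars.lower t = "table of contents".toList)
        && decide (t.length > 1) then
      acc ++ [(String.ofList t, (h.length : Int))]
    else acc

def generate_github_toc_alt (md_text : String) (max_priority : Int) (toc_title : String) :
    Option String :=
  let lines := PySem.Str.splitlines md_text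
  let heads := (lines.zip (insideB lines)).foldl (headStepB max_priority) []
  if heads = [] then none
  else
    -- pass 3: level_i = min_{j<=i}(p_j - j) + i, via a running prefix minimum
    let shifted := (PySem.List.enumerate heads).map (fun ip => ip.2.2 - ip.1)
    -- shifted[0]: heads ≠ [] here, so shifted is nonempty (headD unreachable default)
    let mins := (shifted.foldl (fun (st : List Int × Int) s =>
        (st.1 ++ [min st.2 s], min st.2 s)) ([], shifted.headD 0)).1
    let levels := (PySem.List.enumerate mins).map (fun im => im.2 + im.1)
    -- min(levels); levels nonempty (getD unreachable)
    let base := (PySem.List.min? levels (fun x => x)).getD 0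
    let rows := (heads.zip levels).map (fun tl =>
        String.ofList (List.replicate (tl.2 - base).toNat '\t' ++ "* [".toList
          ++ tl.1.1.toList ++ "](#".toList
          ++ PySem.Chars.replace (PySem.Chars.strip tl.1.1.toList) " ".toList "-".toList
          ++ ")".toList))
    some (PySem.Str.join "\n" ([toc_title, ""] ++ rows))

-- ===== PRECONDITION & SPEC =====
def Spec_generate_github_toc (md_text : String) (max_priority : Int) (toc_title : String) (out : Option String) : Prop := out = generate_github_toc_alt md_text max_priority toc_title
instance (md_text : String) (max_priority : Int) (toc_title : String) (out : Option String) : Decidable (Spec_generate_github_toc md_text max_priority toc_title out) := by unfold Spec_generate_github_toc; infer_instance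

-- ===== CLAIM (what is proved, stated in full; the proofs are below) =====
def Claim_equal_generate_github_toc : Prop := ∀ (md_text : String) (max_priority : Int) (toc_title : String), Dom_generate_github_toc md_text max_priority toc_title → Spec_generate_github_toc md_text max_priority toc_title (generate_github_toc md_text max_priority toc_title)

-- ===== LEMMAS AND PROOFS =====

-- ---- stage 1: B's parity mask + filter collects exactly A's raw header/priority pairs ----

-- the parity mask B's first pass produces, as a structural function
def parList (c : Int) : List String → List Bool
  | [] => []
  | l :: r => (PySem.Int.mod c 2 == 1) ::
      parList (c + (if PySem.Chars.startswith l.toList "```".toList then 1 else 0)) r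

theorem insideB_go (ls : List String) : ∀ (acc : List Bool) (c : Int),
    (ls.foldl (fun (st : List Bool × Int) l =>
        (st.1 ++ [PySem.Int.mod st.2 2 == 1],
         st.2 + (if PySem.Chars.startswith l.toList "```".toList then 1 else 0))) (acc, c)).1
      = acc ++ parList c ls := by
  induction ls with
  | nil => intro acc c; simp [parList]
  | cons l r ih =>
      intro acc c
      simp only [List.foldl_cons, parList]
      rw [ih]
      simp

theorem insideB_eq (lines : List String) : insideB lines = parList 0 lines := by
  unfold insideB
  rw [insideB_go]
  simp

theorem parity_flip (c : Int) :
    (PySem.Int.mod (c + 1) 2 == 1) = !(PySem.Int.mod c 2 == 1) := by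
  have h1 : PySem.Int.mod (c + 1) 2 = (c + 1) % 2 :=
    PySem.Int.mod_eq_emod_of_pos (by norm_num)
  have h2 : PySem.Int.mod c 2 = c % 2 := PySem.Int.mod_eq_emod_of_pos (by norm_num)
  rw [h1, h2]
  rcases Int.emod_two_eq c with h | h
  · have h3 : (c + 1) % 2 = 1 := by omega
    rw [h3, h]
    rfl
  · have h3 : (c + 1) % 2 = 0 := by omega
    rw [h3, h]
    rfl

-- set(h) == {'#'} says exactly "h is a nonempty run of '#'"
theorem setEq_hash (h : List Char) (hm : '#' ∈ h) :
    (PySem.Set.equal (PySem.Set.ofList h) (PySem.Set.ofList ['#']) = true)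
      ↔ h = List.replicate h.length '#' := by
  have e1 : PySem.Set.ofList ['#'] = ['#'] := rfl
  unfold PySem.Set.equal
  rw [e1, Bool.and_eq_true, PySem.Set.issubset_iff, PySem.Set.issubset_iff,
    List.eq_replicate_length]
  constructor
  · intro ⟨h1, _⟩ x hx
    have := h1 x ((PySem.Set.mem_ofList h x).mpr hx)
    simpa using this
  · intro hall
    refine ⟨fun x hx => ?_, fun x hx => ?_⟩
    · have := hall x ((PySem.Set.mem_ofList h x).mp hx)
      simp [this]
    · simp only [List.mem_singleton] at hx
      subst hx
      exact (PySem.Set.mem_ofList h '#').mpr hm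

-- one step of B's filter agrees with one step of A's parse loop
theorem head_step (mp : Int) (l : String) (acc : List (String × Int)) (c : Int) :
    headStepB mp acc (l, PySem.Int.mod c 2 == 1)
      = (parseA mp (acc, PySem.Int.mod c 2 == 1) l).1
    ∧ (parseA mp (acc, PySem.Int.mod c 2 == 1) l).2
      = (PySem.Int.mod (c + (if PySem.Chars.startswith l.toList "```".toList then 1 else 0)) 2 == 1) := by
  cases hf : PySem.Chars.startswith l.toList "```".toList with
  | true =>
      simp only [headStepB, parseA, hf, Bool.true_or, if_true]
      exact ⟨trivial, (parity_flip c).symm⟩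
  | false =>
    cases hc : (PySem.Int.mod c 2 == 1) with
    | true =>
        simp only [headStepB, parseA, hf, hc, Bool.false_or, Bool.true_or, if_true,
          Bool.not_true, Bool.false_and, Bool.false_eq_true, if_false, add_zero]
        exact ⟨trivial, trivial⟩
    | false =>
      cases hh : PySem.Chars.startswith l.toList "#".toList with
      | false =>
          simp only [headStepB, parseA, hf, hc, hh, Bool.false_or, Bool.not_false,
            Bool.true_or, Bool.or_true, if_true,
            Bool.false_and, Bool.and_false, Bool.false_eq_true, if_false, add_zero]
          exact ⟨trivial, trivial⟩
      | true =>
        cases hsp : PySem.Chars.isIn " ".toList l.toList with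
        | false =>
            simp only [headStepB, parseA, hf, hc, hh, hsp, Bool.not_false,
              Bool.not_true, Bool.or_false, Bool.or_true, if_true, Bool.true_and,
              Bool.and_false, Bool.false_eq_true, if_false, add_zero]
            exact ⟨trivial, trivial⟩
        | true =>
          simp only [headStepB, parseA, hf, hc, hh, hsp, Bool.not_true, Bool.not_false,
            Bool.or_false, Bool.false_eq_true, if_false,
            Bool.and_true, if_true, add_zero]
          refine ⟨?_, by split_ifs <;> rfl⟩
          -- l starts with '#', so the header prefix is a nonempty list headed by '#'
          obtain ⟨l', hl⟩ : ∃ l', l.toList = '#' :: l' := by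
            rcases (PySem.Chars.startswith_iff _ _).mp hh with ⟨t, ht⟩
            exact ⟨t, by rw [← ht]; rfl⟩
          rw [hl]
          have hhead : (('#' :: l').takeWhile (· ≠ ' ')).headD ' ' = '#' := by simp
          set hdr := ('#' :: l').takeWhile (· ≠ ' ') with hhdr
          have hmem : '#' ∈ hdr := by rw [hhdr]; simp
          set ttl := (('#' :: l').dropWhile (· ≠ ' ')).drop 1 with httl
          by_cases hrej : hdr ≠ List.replicate hdr.length (hdr.headD ' ')
              ∨ (hdr.length : Int) > mp
          · have hBne : ¬ ((PySem.Set.equal (PySem.Set.ofList hdr) (PySem.Set.ofList ['#'])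
                && decide ((hdr.length : Int) ≤ mp)
                && !decide (PySem.Chars.lower ttl = "table of contents".toList)
                && decide (ttl.length > 1)) = true) := by
              intro hcond
              simp only [Bool.and_eq_true, decide_eq_true_eq, Bool.not_eq_eq_eq_not,
                Bool.not_true, decide_eq_false_iff_not] at hcond
              rcases hrej with hr | hr
              · exact hr (by rw [hhead]; exact (setEq_hash hdr hmem).mp hcond.1.1.1)
              · omega
            rw [if_pos hrej, if_neg hBne]
          · push_neg at hrej
            have hset : PySem.Set.equal (PySem.Set.ofList hdr) (PySem.Set.ofList ['#']) = true :=
              (setEq_hash hdr hmem).mpr (by rw [← hhead]; simpa using hrej.1)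
            by_cases hin : PySem.Chars.lower ttl ≠ "table of contents".toList ∧ ttl.length > 1
            · have hB : ((PySem.Set.equal (PySem.Set.ofList hdr) (PySem.Set.ofList ['#'])
                  && decide ((hdr.length : Int) ≤ mp)
                  && !decide (PySem.Chars.lower ttl = "table of contents".toList)
                  && decide (ttl.length > 1)) = true) := by
                simp only [Bool.and_eq_true, decide_eq_true_eq, Bool.not_eq_eq_eq_not,
                  Bool.not_true, decide_eq_false_iff_not]
                exact ⟨⟨⟨hset, by omega⟩, hin.1⟩, hin.2⟩
              have hArej : ¬ (hdr ≠ List.replicate hdr.length (hdr.headD ' ')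
                  ∨ (hdr.length : Int) > mp) := by
                push_neg
                exact hrej
              rw [if_pos hB, if_neg hArej, if_pos hin]
            · have hBne : ¬ ((PySem.Set.equal (PySem.Set.ofList hdr) (PySem.Set.ofList ['#'])
                  && decide ((hdr.length : Int) ≤ mp)
                  && !decide (PySem.Chars.lower ttl = "table of contents".toList)
                  && decide (ttl.length > 1)) = true) := by
                intro hcond
                simp only [Bool.and_eq_true, decide_eq_true_eq, Bool.not_eq_eq_eq_not,
                  Bool.not_true, decide_eq_false_iff_not] at hcond
                exact hin ⟨hcond.1.2, hcond.2⟩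
              have hArej : ¬ (hdr ≠ List.replicate hdr.length (hdr.headD ' ')
                  ∨ (hdr.length : Int) > mp) := by
                push_neg
                exact hrej
              rw [if_neg hBne, if_neg hArej, if_neg hin]

theorem heads_inv (mp : Int) (ls : List String) : ∀ (c : Int) (acc : List (String × Int)),
    (ls.zip (parList c ls)).foldl (headStepB mp) acc
      = (ls.foldl (parseA mp) (acc, PySem.Int.mod c 2 == 1)).1 := by
  induction ls with
  | nil => intro c acc; rfl
  | cons l r ih =>
      intro c acc
      simp only [parList, List.zip_cons_cons, List.foldl_cons]
      obtain ⟨h1, h2⟩ := head_step mp l acc c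
      rw [h1]
      have hst : parseA mp (acc, PySem.Int.mod c 2 == 1) l
          = ((parseA mp (acc, PySem.Int.mod c 2 == 1) l).1,
             (PySem.Int.mod (c + (if PySem.Chars.startswith l.toList "```".toList then 1 else 0)) 2 == 1)) := by
        rw [← h2]
      rw [hst, ih]

-- ---- stage 2: the sequentialize pass and B's closed-form levels are the same clamp ----

-- the clamp recurrence level_i = min(level_{i-1} + 1, p_i), carried explicitly
def clampGo : Option Int → List (String × Int) → List (String × Int)
  | _, [] => []
  | none, (t, p) :: r => (t, p) :: clampGo (some p) r
  | some q, (t, p) :: r => (t, min (q + 1) p) :: clampGo (some (min (q + 1) p)) r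

theorem seqHP_eq_clampGo (xs : List (String × Int)) : seqHP xs = clampGo none xs := by
  induction xs using seqHP.induct with
  | case1 => simp [seqHP, clampGo]
  | case2 p => cases p; simp [seqHP, clampGo]
  | case3 h p h2 p2 rest ih =>
      simp only [dite_eq_ite] at ih
      rw [seqHP, ih]
      have hmin : (if p2 - p > 1 then p + 1 else p2) = min (p + 1) p2 := by
        rw [min_def]; split_ifs <;> omega
      cases rest with
      | nil => simp [clampGo, hmin]
      | cons x rs =>
          cases x with
          | mk t3 p3 => simp [clampGo, hmin]

theorem clampGo_length (xs : List (String × Int)) : ∀ q, (clampGo q xs).length = xs.length := by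
  induction xs with
  | nil => intro q; cases q <;> rfl
  | cons x r ih => intro q; cases x; cases q <;> simp [clampGo, ih]

-- B's running prefix minimum, as a structural function
def pmins (m : Int) : List Int → List Int
  | [] => []
  | s :: r => min m s :: pmins (min m s) r

theorem mins_go (sh : List Int) : ∀ (acc : List Int) (m : Int),
    (sh.foldl (fun (st : List Int × Int) s =>
        (st.1 ++ [min st.2 s], min st.2 s)) (acc, m)).1 = acc ++ pmins m sh := by
  induction sh with
  | nil => intro acc m; simp [pmins]
  | cons s r ih =>
      intro acc m
      simp only [List.foldl_cons, pmins]
      rw [ih]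
      simp

-- the whole of pass 3 computes the clamp recurrence, for any suffix at offset k with carry m+k-1
theorem levels_go (hs : List (String × Int)) : ∀ (k m : Int),
    ((hs.zip ((PySem.List.enumerate
          (pmins m ((PySem.List.enumerate hs k).map (fun ip => ip.2.2 - ip.1))) k).map
          (fun im => im.2 + im.1))).map (fun tl => (tl.1.1, tl.2)))
      = clampGo (some (m + k - 1)) hs := by
  induction hs with
  | nil => intro k m; rfl
  | cons x r ih =>
      intro k m
      cases x with
      | mk t p =>
        simp only [PySem.List.enumerate_cons, List.map_cons, pmins, List.zip_cons_cons]
        simp only [clampGo]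
        rw [List.cons_eq_cons]
        have hmin : min m (p - k) + k = min (m + k - 1 + 1) p := by
          rw [min_def, min_def]; split_ifs <;> omega
        have ih2 := ih (k + 1) (min m (p - k))
        have hcar : min m (p - k) + (k + 1) - 1 = min (m + k - 1 + 1) p := by omega
        rw [hcar] at ih2
        exact ⟨by simpa using hmin, by simpa using ih2⟩

-- lengths through pass 3
theorem pmins_length (sh : List Int) : ∀ m, (pmins m sh).length = sh.length := by
  induction sh with
  | nil => intro m; rfl
  | cons s r ih => intro m; simp [pmins, ih]

-- the minimising VALUE is the same whether min? runs on the pairs (key snd) or on the snds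
theorem min_snd_eq (pairs : List (String × Int)) (m : String × Int) (v : Int)
    (hm : PySem.List.min? pairs Prod.snd = some m)
    (hv : PySem.List.min? (pairs.map Prod.snd) (fun x => x) = some v) : m.2 = v := by
  have hmem := PySem.List.min?_mem hm
  have hmin := PySem.List.min?_isMin hm
  have hvmem := PySem.List.min?_mem hv
  have hvmin := PySem.List.min?_isMin hv
  rcases List.mem_map.mp hvmem with ⟨y, hy, hyv⟩
  apply le_antisymm
  · calc m.2 ≤ y.2 := hmin y hy
      _ = v := hyv
  · exact hvmin m.2 (List.mem_map_of_mem hmem)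

-- ===== VERDICT (by name: the statement is the Claim_ definition above) =====
theorem generate_github_toc_spec : Claim_equal_generate_github_toc := by
  intro md_text mp toc_title _
  unfold Spec_generate_github_toc
  simp only [generate_github_toc, generate_github_toc_alt]
  set lines := PySem.Str.splitlines md_text with hlines
  -- stage 1: B's heads = A's raw pairs
  have hheads : (lines.zip (insideB lines)).foldl (headStepB mp) []
      = (lines.foldl (parseA mp) ([], false)).1 := by
    rw [insideB_eq, heads_inv mp lines 0 []]
    rfl
  rw [hheads]
  rcases hE : (lines.foldl (parseA mp) ([], false)).1 with _ | ⟨⟨t0, p0⟩, tl⟩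
  · simp [seqHP]
  · have hne : seqHP ((t0, p0) :: tl) ≠ [] := by
      rw [seqHP_eq_clampGo]
      intro hc
      have := clampGo_length ((t0, p0) :: tl) none
      rw [hc] at this
      simp at this
    rw [if_neg (by simpa [List.length_eq_zero_iff] using hne), if_neg (by simp)]
    have hhead0 : (((PySem.List.enumerate ((t0, p0) :: tl) 0).map
        (fun ip => ip.2.2 - ip.1)).headD 0) = p0 := by
      simp [PySem.List.enumerate_cons]
    rw [hhead0, mins_go, List.nil_append]
    set shifted := (PySem.List.enumerate ((t0, p0) :: tl) 0).map (fun ip => ip.2.2 - ip.1)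
      with hshifted
    set levels := (PySem.List.enumerate (pmins p0 shifted) 0).map (fun im => im.2 + im.1)
      with hlevels
    -- stage 2: B's closed-form levels are the sequentialized priorities
    have hlv : seqHP ((t0, p0) :: tl)
        = (((t0, p0) :: tl).zip levels).map (fun tl => (tl.1.1, tl.2)) := by
      rw [hlevels, hshifted]
      have h := levels_go ((t0, p0) :: tl) 0 p0
      have hm0 : min (p0 + 0 - 1 + 1) p0 = p0 := by omega
      have hcar0 : clampGo (some (p0 + 0 - 1)) ((t0, p0) :: tl)
          = clampGo none ((t0, p0) :: tl) := by
        simp only [clampGo, hm0]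
      rw [hcar0, ← seqHP_eq_clampGo] at h
      exact h.symm
    have hlen : levels.length = ((t0, p0) :: tl).length := by
      rw [hlevels, List.length_map, PySem.List.length_enumerate, pmins_length, hshifted,
        List.length_map, PySem.List.length_enumerate]
    have hsnd : (seqHP ((t0, p0) :: tl)).map Prod.snd = levels := by
      rw [hlv, List.map_map]
      have hcomp : (Prod.snd ∘ fun (tl : (String × Int) × Int) => (tl.1.1, tl.2))
          = Prod.snd := rfl
      rw [hcomp]
      exact List.map_snd_zip (by omega)
    -- the two minima agree
    rcases hm : PySem.List.min? (seqHP ((t0, p0) :: tl)) Prod.snd with _ | m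
    · exact absurd ((PySem.List.min?_eq_none_iff _ _).mp hm) hne
    rcases hv : PySem.List.min? levels (fun x => x) with _ | v
    · exfalso
      have hnil := (PySem.List.min?_eq_none_iff _ _).mp hv
      rw [hnil] at hlen
      simp at hlen
    have hmv : m.2 = v := min_snd_eq _ m v hm (by rw [hsnd]; exact hv)
    simp only [Option.getD_some]
    -- the rendered rows agree
    rw [PySem.List.foldl_append_singleton_eq_map, hlv, List.map_map, hmv]
    congr 1
    congr 1
    congr 1
    apply List.map_congr_left
    intro x _
    simp only [Function.comp_apply, anchorA, String.toList_ofList]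
    congr 1
    have e1 : "* ".toList = ['*', ' '] := rfl
    have e2 : "* [".toList = ['*', ' ', '['] := rfl
    have e3 : "[".toList = ['['] := rfl
    rw [e1, e2, e3]
    simp
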